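-- pv_equiv track=rewrite | github.com/theturboturnip/yk_gmd_io | yk_gmd_blender/yk_gmd/abstract/vertices.py | get_vector_format_string
-- ===== SOURCE A (Python) =====
-- def get_vector_format_string(value):
--     format_string = ""
--     for i in range(value):
--         if value >= 3:
--             format_string += "f"
--         elif value == 2:
--             format_string += "ee"
--         else:
--             format_string += "BBBB"
--     return format_string
-- ===== SOURCE B (Python) =====
-- def get_vector_format_string(value):
--     if value >= 3:
--         unit = "f"
--     elif value == 2:
--         unit = "ee"
--     else:
--         unit = "BBBB"
--     return unit * value
-- ===== Notes on version B (the rewrite author's own statement) =====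
-- stated objective: simpler
-- what changed: The branch on value is hoisted out of the loop (it is loop-invariant) and the per-iteration string accumulation is replaced by a single closed-form string repetition unit * value.
import Mathlib
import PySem

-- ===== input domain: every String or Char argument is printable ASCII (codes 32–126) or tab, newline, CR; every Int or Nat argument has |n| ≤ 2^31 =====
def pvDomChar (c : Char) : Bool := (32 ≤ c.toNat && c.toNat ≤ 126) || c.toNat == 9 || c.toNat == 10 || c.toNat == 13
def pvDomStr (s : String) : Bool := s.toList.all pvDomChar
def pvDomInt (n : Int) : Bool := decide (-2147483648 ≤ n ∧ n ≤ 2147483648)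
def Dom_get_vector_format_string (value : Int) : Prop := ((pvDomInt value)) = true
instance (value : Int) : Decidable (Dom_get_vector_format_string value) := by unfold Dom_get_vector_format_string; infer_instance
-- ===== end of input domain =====

-- B hoists the loop-invariant branch out of the loop and returns unit * value (closed-form repetition); same value everywhere.

-- ===== PORT A =====
def get_vector_format_string (value : Int) : String :=
  (PySem.List.pyRange 0 value 1).foldl
    (fun format_string _ =>
      if value ≥ 3 then format_string ++ "f"
      else if value = 2 then format_string ++ "ee"
      else format_string ++ "BBBB")
    ""

-- ===== PORT B =====
def get_vector_format_string_alt (value : Int) : String :=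
  let unit : String :=
    if value ≥ 3 then "f"
    else if value = 2 then "ee"
    else "BBBB"
  String.ofList (PySem.List.pyRepeat unit.toList value)

-- ===== PRECONDITION & SPEC =====
def Spec_get_vector_format_string (value : Int) (out : String) : Prop := out = get_vector_format_string_alt value
instance (value : Int) (out : String) : Decidable (Spec_get_vector_format_string value out) := by unfold Spec_get_vector_format_string; infer_instance

-- ===== CLAIM (what is proved, stated in full; the proofs are below) =====
def Claim_equal_get_vector_format_string : Prop := ∀ (value : Int), Dom_get_vector_format_string value → Spec_get_vector_format_string value (get_vector_format_string value)

-- ===== LEMMAS AND PROOFS =====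

-- the accumulation loop with a constant appended string is a string repetition
theorem pv_foldl_append_const (u : String) (n : Nat) (s : String) :
    (List.range n).foldl (fun acc _ => acc ++ u) s = s ++ String.ofList (PySem.List.pyRepeat u.toList n) := by
  induction n generalizing s with
  | zero => simp [PySem.List.pyRepeat]
  | succ n ih =>
      rw [List.range_succ, List.foldl_append, ih]
      have hu : u = String.ofList u.toList := by simp
      simp only [PySem.List.pyRepeat, Int.toNat_natCast, List.replicate_succ',
        List.flatten_concat, List.foldl_cons, List.foldl_nil]
      rw [String.append_assoc]
      congr 1
      conv_lhs => rw [hu]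
      simp

theorem get_vector_format_string_eq (value : Int) :
    get_vector_format_string value = get_vector_format_string_alt value := by
  unfold get_vector_format_string get_vector_format_string_alt
  by_cases h : value ≤ 0
  · rw [PySem.List.pyRange_one_eq_nil h]
    simp [PySem.List.pyRepeat, Int.toNat_of_nonpos h]
  · rw [Int.not_le] at h
    have hv : value = (value.toNat : Int) := (Int.toNat_of_nonneg h.le).symm
    rw [hv, PySem.List.pyRange_one]
    simp only [Int.sub_zero, Int.toNat_natCast, List.foldl_map, Int.toNat_natCast]
    split_ifs with h3 h2
    · exact pv_foldl_append_const "f" value.toNat ""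
    · exact pv_foldl_append_const "ee" value.toNat ""
    · exact pv_foldl_append_const "BBBB" value.toNat ""

-- ===== VERDICT (by name: the statement is the Claim_ definition above) =====
theorem get_vector_format_string_spec : Claim_equal_get_vector_format_string := by
  intro value _
  exact get_vector_format_string_eq value
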